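-- pv_equiv track=rewrite | github.com/krnets/codewars-practice | 7kyu/Comfortable words/kata.py | comfortable_word
-- ===== SOURCE A (Python) =====
-- def comfortable_word(word):
--     left = {"q", "w", "e", "r", "t", "a", "s", "d", "f", "g", "z", "x", "c", "v", "b"}
--     right = {"y", "u", "i", "o", "p", "h", "j", "k", "l", "n", "m"}
--     flag = (False, True)[word[0] in left]
--
--     for c in word:
--         if (flag and c in left) or (not flag and c in right):
--             flag = not flag
--         else:
--             return False
--     return True
-- ===== SOURCE B (Python) =====
-- LEFT = set("qwertasdfgzxcvb")
-- RIGHT = set("yuiophjklnm")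
--
--
-- def _side(c):
--     if c in LEFT:
--         return False
--     if c in RIGHT:
--         return True
--     return None
--
--
-- def comfortable_word(word):
--     sides = [_side(c) for c in word]
--     return None not in sides and all(x != y for x, y in zip(sides, sides[1:]))
-- ===== Notes on version B (the rewrite author's own statement) =====
-- stated objective: simpler
-- what changed: B replaces A's stateful flag-toggling loop with early return by a classify-then-check pipeline: map each character to its keyboard half once, then test that no character is unclassified and that adjacent halves differ via zip.
import Mathlib
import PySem

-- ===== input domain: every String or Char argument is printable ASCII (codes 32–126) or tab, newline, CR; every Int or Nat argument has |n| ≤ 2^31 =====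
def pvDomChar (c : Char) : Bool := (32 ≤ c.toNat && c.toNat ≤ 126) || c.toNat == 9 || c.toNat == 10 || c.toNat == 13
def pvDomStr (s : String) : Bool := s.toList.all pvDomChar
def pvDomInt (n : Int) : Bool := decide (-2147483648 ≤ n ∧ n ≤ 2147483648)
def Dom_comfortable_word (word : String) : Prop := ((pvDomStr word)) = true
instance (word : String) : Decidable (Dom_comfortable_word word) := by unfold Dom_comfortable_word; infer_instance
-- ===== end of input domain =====

-- B classifies every character once (left=false, right=true, other=none) and then checks
-- that no character is unclassified and adjacent sides differ; objective: simpler decomposition.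

-- the two keyboard halves (the same literal sets both Pythons use)
def cwLeft : List Char := ['q','w','e','r','t','a','s','d','f','g','z','x','c','v','b']
def cwRight : List Char := ['y','u','i','o','p','h','j','k','l','n','m']

-- ===== PORT A =====
-- the for-loop of A: toggle flag while the current char is on the expected half, else return False
def cwLoop : List Char → Bool → Bool
  | [], _ => true
  | c :: cs, flag =>
    if (flag && cwLeft.contains c) || (!flag && cwRight.contains c) then cwLoop cs (!flag)
    else false

def comfortable_word (word : String) : Bool :=
  match PySem.Str.pyGet? word 0 with   -- word[0]: none = IndexError, excluded by Pre_
  | none => false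
  | some c0 =>
    let flag := cwLeft.contains c0     -- (False, True)[word[0] in left]
    cwLoop word.toList flag

-- ===== PORT B =====
def cwSide (c : Char) : Option Bool :=   -- _side: False = left, True = right, none = neither
  if cwLeft.contains c then some false
  else if cwRight.contains c then some true
  else none

def cwAllDiff (l : List (Option Bool)) : Bool :=   -- all(x != y for x, y in zip(sides, sides[1:]))
  (l.zip l.tail).all (fun p => p.1 != p.2)

def comfortable_word_alt (word : String) : Bool :=
  let sides := word.toList.map cwSide
  !(sides.contains none) && cwAllDiff sides

-- ===== PRECONDITION & SPEC =====
-- Pre_ excludes only the empty string, on which A raises IndexError at word[0].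
def Pre_comfortable_word (word : String) : Prop := word ≠ ""
instance (word : String) : Decidable (Pre_comfortable_word word) := by unfold Pre_comfortable_word; infer_instance
def pvWitness_comfortable_word : String := "qh"

def Spec_comfortable_word (word : String) (out : Bool) : Prop := out = comfortable_word_alt word
instance (word : String) (out : Bool) : Decidable (Spec_comfortable_word word out) := by unfold Spec_comfortable_word; infer_instance

-- ===== CLAIM (what is proved, stated in full; the proofs are below) =====
def Claim_equal_comfortable_word : Prop := ∀ (word : String), Dom_comfortable_word word → Pre_comfortable_word word → Spec_comfortable_word word (comfortable_word word)

-- ===== LEMMAS AND PROOFS =====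

-- "expected side e next" checker: the common shape both ports reduce to
def cwChk : List (Option Bool) → Bool → Bool
  | [], _ => true
  | s :: l, e => (s == some e) && cwChk l (!e)

theorem cwSide_eq_some_false (c : Char) : (cwSide c == some false) = cwLeft.contains c := by
  unfold cwSide; split_ifs with h1 h2 <;> simp_all

theorem cwLeft_right_disjoint (c : Char) (h : cwLeft.contains c = true) :
    cwRight.contains c = false := by
  simp only [cwLeft, List.contains_eq_mem, List.mem_cons, List.not_mem_nil, or_false,
    decide_eq_true_eq] at h
  rcases h with rfl|rfl|rfl|rfl|rfl|rfl|rfl|rfl|rfl|rfl|rfl|rfl|rfl|rfl|rfl <;> decide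

theorem cwSide_eq_some_true (c : Char) : (cwSide c == some true) = cwRight.contains c := by
  unfold cwSide; split_ifs with h1 h2
  · have h := cwLeft_right_disjoint c h1; simp_all
  · simp_all
  · simp_all

theorem cwLoop_eq_chk (cs : List Char) (flag : Bool) :
    cwLoop cs flag = cwChk (cs.map cwSide) (!flag) := by
  induction cs generalizing flag with
  | nil => rfl
  | cons c cs ih =>
    simp only [cwLoop, List.map_cons, cwChk, ih, Bool.not_not]
    cases flag with
    | false => simp [cwSide_eq_some_true, Bool.and_comm]
    | true => simp [cwSide_eq_some_false]

theorem cwChk_eq (l : List (Option Bool)) (e : Bool) :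
    cwChk l e = (!(l.contains none) && (cwAllDiff l && (l.headD (some e) == some e))) := by
  induction l generalizing e with
  | nil => simp [cwChk, cwAllDiff]
  | cons s l ih =>
    simp only [cwChk, ih (!e)]
    cases l with
    | nil =>
      cases s with
      | none => simp [cwAllDiff]
      | some b => cases b <;> cases e <;> simp [cwAllDiff]
    | cons t l' =>
      have hzip : cwAllDiff (s :: t :: l') = ((s != t) && cwAllDiff (t :: l')) := by
        simp [cwAllDiff, List.zip]
      rw [hzip]
      cases s with
      | none => simp
      | some x =>
        cases t with
        | none => simp
        | some y =>
          simp only [List.contains_cons, List.headD_cons]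
          cases x <;> cases y <;> cases e <;>
            cases hc : l'.contains none <;>
              simp_all [Bool.and_comm, Bool.and_left_comm]

-- the needed head facts about cwSide
theorem cwSide_none_left (c : Char) (h : cwSide c = none) : cwLeft.contains c = false := by
  unfold cwSide at h; split_ifs at h <;> simp_all

theorem cwSide_false_left (c : Char) (h : cwSide c = some false) : cwLeft.contains c = true := by
  unfold cwSide at h; split_ifs at h <;> simp_all

theorem cwSide_true_left (c : Char) (h : cwSide c = some true) : cwLeft.contains c = false := by
  unfold cwSide at h; split_ifs at h <;> simp_all

-- ===== VERDICT (by name: the statement is the Claim_ definition above) =====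
theorem comfortable_word_spec : Claim_equal_comfortable_word := by
  intro word _ hpre
  unfold Spec_comfortable_word comfortable_word comfortable_word_alt
  have hne : word.toList ≠ [] := by
    simpa [String.toList_eq_nil_iff] using hpre
  obtain ⟨c, cs, hcs⟩ := List.exists_cons_of_ne_nil hne
  have hget : PySem.Str.pyGet? word 0 = some c := by
    simp [hcs]
  rw [hget]
  simp only [hcs, cwLoop_eq_chk, List.map_cons]
  cases hs : cwSide c with
  | none =>
    have hl := cwSide_none_left c hs
    rw [hl]
    simp [cwChk, cwAllDiff]
  | some b =>
    cases b with
    | false =>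
      rw [cwSide_false_left c hs, cwChk_eq]
      simp
    | true =>
      rw [cwSide_true_left c hs, cwChk_eq]
      simp
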